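-- pv_equiv track=rewrite | github.com/datahub-project/datahub | metadata-ingestion/src/datahub/ingestion/source/google_sheets/utils.py | index_to_column_letter
-- ===== SOURCE A (Python) =====
-- def index_to_column_letter(index: int) -> str:
--     """Convert zero-based column index to Excel-style column letter.
--
--     Args:
--         index: Zero-based column index
--
--     Returns:
--         Column letter (e.g., "A", "Z", "AA")
--     """
--     letter = ""
--     index += 1
--     while index > 0:
--         index -= 1
--         letter = chr(index % 26 + ord("A")) + letter
--         index //= 26
--     return letter
-- ===== SOURCE B (Python) =====
-- def index_to_column_letter(index: int) -> str:
--     """Convert zero-based column index to Excel-style column letter (recursive)."""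
--     if index < 0:
--         return ""
--     return index_to_column_letter(index // 26 - 1) + chr(index % 26 + ord("A"))
-- ===== Notes on version B (the rewrite author's own statement) =====
-- stated objective: simpler
-- what changed: Replaces the iterative prepend-while-loop (with the +=1 then -=1 bookkeeping) by a two-line recursion on the quotient that emits digits high-order first on the way back.
import Mathlib
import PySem

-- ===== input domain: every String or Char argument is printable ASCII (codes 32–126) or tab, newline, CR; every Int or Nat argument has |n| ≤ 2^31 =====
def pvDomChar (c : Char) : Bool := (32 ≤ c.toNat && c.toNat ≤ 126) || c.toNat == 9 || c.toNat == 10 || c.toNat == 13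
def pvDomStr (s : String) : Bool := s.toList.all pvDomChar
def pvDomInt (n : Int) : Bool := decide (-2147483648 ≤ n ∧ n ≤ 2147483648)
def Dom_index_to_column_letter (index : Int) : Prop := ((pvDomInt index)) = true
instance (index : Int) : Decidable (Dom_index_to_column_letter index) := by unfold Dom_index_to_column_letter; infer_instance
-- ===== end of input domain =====

-- B replaces A's iterative prepend loop by a direct recursion on the quotient (simpler decomposition, same cost).

-- ===== PORT A =====
-- the while loop of A: state is (index, letter)
def idxColLoop (index : Int) (letter : String) : String :=
  if _h : index > 0 then
    let i := index - 1
    idxColLoop (PySem.Int.floordiv i 26)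
      (String.ofList [Char.ofNat ((PySem.Int.mod i 26) + 65).toNat] ++ letter)
  else letter
termination_by index.toNat
decreasing_by
  have h1 : PySem.Int.floordiv (index - 1) 26 = (index - 1) / 26 :=
    PySem.Int.floordiv_eq_ediv_of_pos (by omega)
  have h2 : (index - 1) / 26 ≤ index - 1 := by
    apply Int.ediv_le_self; omega
  omega

def index_to_column_letter (index : Int) : String :=
  idxColLoop (index + 1) ""

-- ===== PORT B =====
def index_to_column_letter_alt (index : Int) : String :=
  if _h : index < 0 then ""
  else index_to_column_letter_alt (PySem.Int.floordiv index 26 - 1)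
        ++ String.ofList [Char.ofNat ((PySem.Int.mod index 26) + 65).toNat]
termination_by (index + 1).toNat
decreasing_by
  have h1 : PySem.Int.floordiv index 26 = index / 26 :=
    PySem.Int.floordiv_eq_ediv_of_pos (by omega)
  have h2 : index / 26 ≤ index := by
    apply Int.ediv_le_self; omega
  have h3 : 0 ≤ index / 26 := Int.ediv_nonneg (by omega) (by omega)
  omega

-- ===== PRECONDITION & SPEC =====
def Spec_index_to_column_letter (index : Int) (out : String) : Prop := out = index_to_column_letter_alt index
instance (index : Int) (out : String) : Decidable (Spec_index_to_column_letter index out) := by unfold Spec_index_to_column_letter; infer_instance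

-- ===== CLAIM (what is proved, stated in full; the proofs are below) =====
def Claim_equal_index_to_column_letter : Prop := ∀ (index : Int), Dom_index_to_column_letter index → Spec_index_to_column_letter index (index_to_column_letter index)

-- ===== LEMMAS AND PROOFS =====

-- Loop/recursion correspondence: A's loop run from n with accumulator `letter`
-- equals B's recursion at n-1 with `letter` appended.
theorem idxColLoop_eq_alt (n : Int) (letter : String) :
    idxColLoop n letter = index_to_column_letter_alt (n - 1) ++ letter := by
  induction n, letter using idxColLoop.induct with
  | case1 n letter h i ih =>
      rw [idxColLoop]
      simp only [h, dite_true]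
      rw [ih]
      conv_rhs => rw [index_to_column_letter_alt]
      have hn : ¬ (n - 1 < 0) := by omega
      simp only [hn, dite_false]
      rw [String.append_assoc]
  | case2 n letter h =>
      rw [idxColLoop]
      simp only [h, dite_false]
      rw [index_to_column_letter_alt]
      have hn : n - 1 < 0 := by omega
      simp only [hn, dite_true]
      simp

-- ===== VERDICT (by name: the statement is the Claim_ definition above) =====
theorem index_to_column_letter_spec : Claim_equal_index_to_column_letter := by
  intro index _
  unfold Spec_index_to_column_letter index_to_column_letter
  rw [idxColLoop_eq_alt]
  simp
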